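-- pv_equiv track=rewrite | github.com/maciekolejnik/mturkDataAnalysis | auxiliary.py | compute_earned
-- ===== SOURCE A (Python) =====
-- def compute_earned(history):
--     investor = 0
--     investee = 0
--     for play_round in history:
--         invested = play_round.get('invested')
--         returned = play_round.get('returned')
--         investor += 4 - invested + returned
--         investee += 2 * invested - returned
--     return {
--         'investor': investor,
--         'investee': investee
--     }
-- ===== SOURCE B (Python) =====
-- def compute_earned(history):
--     if not history:
--         return {'investor': 0, 'investee': 0}
--     rest = compute_earned(history[1:])
--     invested = history[0].get('invested')
--     returned = history[0].get('returned')
--     return {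
--         'investor': rest['investor'] + 4 - invested + returned,
--         'investee': rest['investee'] + 2 * invested - returned
--     }
-- ===== Notes on version B (the rewrite author's own statement) =====
-- stated objective: alternative
-- what changed: Replaces A's single forward loop with two mutable accumulators by a structural recursion on the list: the base case returns the zero dict and each step adds the head round's contributions to the recursively computed totals of the tail.
import Mathlib
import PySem

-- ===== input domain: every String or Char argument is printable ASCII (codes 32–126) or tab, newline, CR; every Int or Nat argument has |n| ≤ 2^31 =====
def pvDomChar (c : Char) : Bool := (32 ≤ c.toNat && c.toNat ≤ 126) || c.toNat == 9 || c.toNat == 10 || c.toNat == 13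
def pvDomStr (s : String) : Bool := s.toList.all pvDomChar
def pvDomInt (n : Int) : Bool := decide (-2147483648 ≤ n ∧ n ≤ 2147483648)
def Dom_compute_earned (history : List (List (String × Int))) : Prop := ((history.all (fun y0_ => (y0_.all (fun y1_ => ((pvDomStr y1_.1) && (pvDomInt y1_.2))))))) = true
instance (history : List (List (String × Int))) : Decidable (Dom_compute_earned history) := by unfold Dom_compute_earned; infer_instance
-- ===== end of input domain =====

-- B replaces A's forward loop with two mutable accumulators by a structural recursion
-- on the list (base case: zero dict; step: add the head round to the tail's totals).

-- ===== PORT A =====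
def compute_earned (history : List (List (String × Int))) : List (String × Int) :=
  let st := history.foldl (fun (st : Int × Int) play_round =>
    let invested := ((PySem.Dict.mk play_round).get? "invested").getD 0
    let returned := ((PySem.Dict.mk play_round).get? "returned").getD 0
    (st.1 + (4 - invested + returned), st.2 + (2 * invested - returned))) (0, 0)
  [("investor", st.1), ("investee", st.2)]

-- ===== PORT B =====
def compute_earned_alt : List (List (String × Int)) → List (String × Int)
  | [] => [("investor", 0), ("investee", 0)]
  | r :: rest =>
    let prev := compute_earned_alt rest
    let invested := ((PySem.Dict.mk r).get? "invested").getD 0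
    let returned := ((PySem.Dict.mk r).get? "returned").getD 0
    [("investor", ((PySem.Dict.mk prev).get? "investor").getD 0 + 4 - invested + returned),
     ("investee", ((PySem.Dict.mk prev).get? "investee").getD 0 + 2 * invested - returned)]

-- ===== PRECONDITION & SPEC =====
-- Pre_ excludes rounds missing the 'invested' or 'returned' key, on which Python's
-- .get returns None and both A and B raise TypeError.
def Pre_compute_earned (history : List (List (String × Int))) : Prop :=
  ∀ r ∈ history, (PySem.Dict.mk r).contains "invested" = true ∧ (PySem.Dict.mk r).contains "returned" = true
instance (history : List (List (String × Int))) : Decidable (Pre_compute_earned history) := by unfold Pre_compute_earned; infer_instance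
def pvWitness_compute_earned : (List (List (String × Int))) :=
  [[("invested", 3), ("returned", 5)], [("invested", 0), ("returned", 1)]]
def Spec_compute_earned (history : List (List (String × Int))) (out : List (String × Int)) : Prop := out = compute_earned_alt history
instance (history : List (List (String × Int))) (out : List (String × Int)) : Decidable (Spec_compute_earned history out) := by unfold Spec_compute_earned; infer_instance

-- ===== CLAIM (what is proved, stated in full; the proofs are below) =====
def Claim_equal_compute_earned : Prop := ∀ (history : List (List (String × Int))), Dom_compute_earned history → Pre_compute_earned history → Spec_compute_earned history (compute_earned history)

-- ===== LEMMAS AND PROOFS =====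
lemma alt_closed (history : List (List (String × Int))) :
    compute_earned_alt history =
      [("investor", (history.map (fun r =>
          4 - ((PySem.Dict.mk r).get? "invested").getD 0 + ((PySem.Dict.mk r).get? "returned").getD 0)).sum),
       ("investee", (history.map (fun r =>
          2 * ((PySem.Dict.mk r).get? "invested").getD 0 - ((PySem.Dict.mk r).get? "returned").getD 0)).sum)] := by
  induction history with
  | nil => simp [compute_earned_alt]
  | cons r rest ih =>
      simp only [compute_earned_alt, ih, List.map_cons, List.sum_cons]
      simp [PySem.Dict.get?]
      constructor <;> ring

lemma a_fold (history : List (List (String × Int))) (a b : Int) :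
    history.foldl (fun (st : Int × Int) play_round =>
      let invested := ((PySem.Dict.mk play_round).get? "invested").getD 0
      let returned := ((PySem.Dict.mk play_round).get? "returned").getD 0
      (st.1 + (4 - invested + returned), st.2 + (2 * invested - returned))) (a, b)
    = (a + (history.map (fun r =>
          4 - ((PySem.Dict.mk r).get? "invested").getD 0 + ((PySem.Dict.mk r).get? "returned").getD 0)).sum,
       b + (history.map (fun r =>
          2 * ((PySem.Dict.mk r).get? "invested").getD 0 - ((PySem.Dict.mk r).get? "returned").getD 0)).sum) := by
  induction history generalizing a b with
  | nil => simp
  | cons h t ih =>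
      simp only [List.foldl_cons, List.map_cons, List.sum_cons, ih]
      exact Prod.ext (by ring) (by ring)

-- ===== VERDICT (by name: the statement is the Claim_ definition above) =====
theorem compute_earned_spec : Claim_equal_compute_earned := by
  intro history _ _
  unfold Spec_compute_earned compute_earned
  simp only [a_fold, alt_closed]
  norm_num
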